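-- pv_equiv track=rewrite | github.com/lostmyway02/CSE_318 | heuristics.py | heuristic_9
-- ===== SOURCE A (Python) =====
-- def heuristic_9(board, ai_player):
--     rows = len(board)
--     cols = len(board[0])
--     score = 0
--     edge_cells = []
--     corner_positions = [(0, 0), (0, cols - 1), (rows - 1, 0), (rows - 1, cols - 1)]
--
--
--     # Edge consists of top, bottom, left, right cloumns excluding corners
--     # Top & Bottom
--     for j in range(1, cols - 1):
--         edge_cells.append((0,j))
--         edge_cells.append((rows - 1, j))
--
--     # Left & Right
--     for i in range(1, rows-1):
--         edge_cells.append((i,0))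
--         edge_cells.append((i, cols -1))
--
--     for i in range(rows):
--         for j in range(cols):
--             count, owner = board[i][j]
--             if owner == ai_player:
--                 score -= count  # base score for owning orbs
--
--                 if (i, j) in edge_cells:
--                     score -= 1
--                 elif (i,j) in corner_positions:
--                     score -= 2
--
--             elif owner and owner != ai_player:
--                 score += count
--
--                 if (i, j) in edge_cells:
--                     score += 1
--                 elif (i,j) in corner_positions:
--                     score += 2
--
--
--     return score
-- ===== SOURCE B (Python) =====
-- def heuristic_9(board, ai_player):
--     rows = len(board)
--     cols = len(board[0])
--
--     def sign(owner):
--         if owner == ai_player: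
--             return -1
--         if owner:
--             return 1
--         return 0
--
--     # Pass 1: base score over all cells.
--     score = 0
--     for row in board:
--         for count, owner in row[:cols]:
--             score += sign(owner) * count
--
--     # Pass 2: boundary bonuses, visiting each distinct boundary cell once.
--     corners = set()
--     for pos in ((0, 0), (0, cols - 1), (rows - 1, 0), (rows - 1, cols - 1)):
--         corners.add(pos)
--     edges = set()
--     for j in range(1, cols - 1):
--         edges.add((0, j))
--         edges.add((rows - 1, j))
--     for i in range(1, rows - 1):
--         edges.add((i, 0))
--         edges.add((i, cols - 1))
--
--     for i, j in corners:
--         score += 2 * sign(board[i][j][1])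
--     for i, j in edges:
--         score += sign(board[i][j][1])
--     return score
-- ===== Notes on version B (the rewrite author's own statement) =====
-- stated objective: faster
-- what changed: Instead of scanning every cell and testing its membership in an O(rows+cols) edge list, B sums the base score in one plain pass and then adds the +-2/+-1 bonuses by visiting only the distinct corner and edge coordinates directly.
-- outside the precondition, e.g. on heuristic_9([[]], 0): A returns 0, B raises IndexError
import Mathlib
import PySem

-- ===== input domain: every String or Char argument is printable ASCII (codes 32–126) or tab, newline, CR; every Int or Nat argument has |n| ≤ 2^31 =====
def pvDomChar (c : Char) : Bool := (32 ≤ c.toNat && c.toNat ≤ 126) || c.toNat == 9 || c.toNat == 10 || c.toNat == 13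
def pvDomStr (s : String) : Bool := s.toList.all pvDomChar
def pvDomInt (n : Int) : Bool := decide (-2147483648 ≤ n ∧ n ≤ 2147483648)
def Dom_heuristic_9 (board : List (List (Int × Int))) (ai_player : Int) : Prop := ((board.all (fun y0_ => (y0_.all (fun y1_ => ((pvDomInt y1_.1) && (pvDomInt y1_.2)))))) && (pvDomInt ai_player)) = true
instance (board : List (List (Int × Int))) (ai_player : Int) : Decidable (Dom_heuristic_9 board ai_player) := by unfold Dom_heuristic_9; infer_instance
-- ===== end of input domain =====

-- B replaces A's per-cell membership test in an O(rows+cols) edge list by one plain base-score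
-- pass plus a direct visit of the distinct corner/edge coordinates (measured faster by the check).

-- ===== PORT A =====
def heuristic_9 (board : List (List (Int × Int))) (ai_player : Int) : Int :=
  let rows : Int := (board.length : Int)
  let cols : Int := ((PySem.List.pyGetD board 0 []).length : Int)
  let corner_positions : List (Int × Int) := [(0, 0), (0, cols - 1), (rows - 1, 0), (rows - 1, cols - 1)]
  let edge_cells : List (Int × Int) :=
    (PySem.List.pyRange 1 (cols - 1)).foldl (fun acc j => acc ++ [(0, j), (rows - 1, j)]) []
  let edge_cells : List (Int × Int) :=
    (PySem.List.pyRange 1 (rows - 1)).foldl (fun acc i => acc ++ [(i, 0), (i, cols - 1)]) edge_cells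
  (PySem.List.pyRange 0 rows).foldl (fun score i =>
    (PySem.List.pyRange 0 cols).foldl (fun score j =>
      let cell := PySem.List.pyGetD (PySem.List.pyGetD board i []) j (0, 0)
      let count := cell.1
      let owner := cell.2
      if owner == ai_player then
        let score := score - count
        if edge_cells.contains (i, j) then score - 1
        else if corner_positions.contains (i, j) then score - 2
        else score
      else if owner != 0 && owner != ai_player then
        let score := score + count
        if edge_cells.contains (i, j) then score + 1
        else if corner_positions.contains (i, j) then score + 2
        else score
      else score) score) 0

-- ===== PORT B =====
-- sign(owner) from Source B
def pvSign (ai_player owner : Int) : Int :=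
  if owner == ai_player then -1 else if owner != 0 then 1 else 0

def heuristic_9_alt (board : List (List (Int × Int))) (ai_player : Int) : Int :=
  let rows : Int := (board.length : Int)
  let cols : Int := ((PySem.List.pyGetD board 0 []).length : Int)
  -- Pass 1: base score over the first `cols` cells of every row
  let score : Int := board.foldl (fun s row =>
    (PySem.List.slice row none (some cols)).foldl
      (fun s c => s + pvSign ai_player c.2 * c.1) s) 0
  -- Pass 2: boundary bonuses, each distinct boundary cell once
  let corners : PySem.Set (Int × Int) :=
    ([(0, 0), (0, cols - 1), (rows - 1, 0), (rows - 1, cols - 1)] : List (Int × Int)).foldl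
      (fun s p => PySem.Set.add s p) PySem.Set.empty
  let edges : PySem.Set (Int × Int) :=
    (PySem.List.pyRange 1 (cols - 1)).foldl
      (fun s j => PySem.Set.add (PySem.Set.add s (0, j)) (rows - 1, j)) PySem.Set.empty
  let edges : PySem.Set (Int × Int) :=
    (PySem.List.pyRange 1 (rows - 1)).foldl
      (fun s i => PySem.Set.add (PySem.Set.add s (i, 0)) (i, cols - 1)) edges
  let score : Int := corners.foldl (fun s p =>
    s + 2 * pvSign ai_player (PySem.List.pyGetD (PySem.List.pyGetD board p.1 []) p.2 (0, 0)).2) score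
  edges.foldl (fun s p =>
    s + pvSign ai_player (PySem.List.pyGetD (PySem.List.pyGetD board p.1 []) p.2 (0, 0)).2) score

-- ===== PRECONDITION & SPEC =====
-- Pre_ excludes boards A itself raises on (empty board, a row shorter than the first) and, via
-- 1 ≤ width, degenerate boards whose first row is empty: there A returns 0 while B's boundary
-- pass indexes a corner of an empty row and raises IndexError.
def Pre_heuristic_9 (board : List (List (Int × Int))) (ai_player : Int) : Prop :=
  board ≠ [] ∧ 1 ≤ (board.headD []).length ∧
    ∀ row ∈ board, (board.headD []).length ≤ row.length
instance (board : List (List (Int × Int))) (ai_player : Int) : Decidable (Pre_heuristic_9 board ai_player) := by unfold Pre_heuristic_9; infer_instance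

def pvWitness_heuristic_9 : (List (List (Int × Int))) × Int :=
  ([[(1, 1), (2, 2)], [(3, 0), (1, 1)]], 1)

def Spec_heuristic_9 (board : List (List (Int × Int))) (ai_player : Int) (out : Int) : Prop := out = heuristic_9_alt board ai_player
instance (board : List (List (Int × Int))) (ai_player : Int) (out : Int) : Decidable (Spec_heuristic_9 board ai_player out) := by unfold Spec_heuristic_9; infer_instance

-- ===== CLAIM (what is proved, stated in full; the proofs are below) =====
def Claim_equal_heuristic_9 : Prop := ∀ (board : List (List (Int × Int))) (ai_player : Int), Dom_heuristic_9 board ai_player → Pre_heuristic_9 board ai_player → Spec_heuristic_9 board ai_player (heuristic_9 board ai_player)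

-- ===== LEMMAS AND PROOFS =====

-- the cell board[i][j] and its sign, as both ports read it
def pvCell (board : List (List (Int × Int))) (p : Int × Int) : Int × Int :=
  PySem.List.pyGetD (PySem.List.pyGetD board p.1 []) p.2 (0, 0)

def pvSg (board : List (List (Int × Int))) (ai : Int) (p : Int × Int) : Int :=
  pvSign ai (pvCell board p).2

-- A's corner list, edge list (as built) and its flatMap normal form, and the full grid
def pvK (r c : Int) : List (Int × Int) := [(0, 0), (0, c - 1), (r - 1, 0), (r - 1, c - 1)]

def pvE0 (r c : Int) : List (Int × Int) :=
  (PySem.List.pyRange 1 (r - 1)).foldl (fun acc i => acc ++ [(i, 0), (i, c - 1)])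
    ((PySem.List.pyRange 1 (c - 1)).foldl (fun acc j => acc ++ [(0, j), (r - 1, j)]) [])

def pvE (r c : Int) : List (Int × Int) :=
  (PySem.List.pyRange 1 (c - 1)).flatMap (fun j => [(0, j), (r - 1, j)]) ++
    (PySem.List.pyRange 1 (r - 1)).flatMap (fun i => [(i, 0), (i, c - 1)])

def pvG (r c : Int) : List (Int × Int) := PySem.List.pyRange 0 r ×ˢ PySem.List.pyRange 0 c

-- A's per-cell contribution
def pvD (board : List (List (Int × Int))) (ai : Int) (E K : List (Int × Int)) (p : Int × Int) : Int :=
  pvSg board ai p * (pvCell board p).1 +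
    pvSg board ai p * (if E.contains p then 1 else if K.contains p then 2 else 0)

-- A's inner-loop body, as a named function (defeq to the port's body)
def pvABody (board : List (List (Int × Int))) (ai : Int) (E K : List (Int × Int)) (i : Int) :
    Int → Int → Int := fun score j =>
  let cell := PySem.List.pyGetD (PySem.List.pyGetD board i []) j (0, 0)
  let count := cell.1
  let owner := cell.2
  if owner == ai then
    let score := score - count
    if E.contains (i, j) then score - 1
    else if K.contains (i, j) then score - 2
    else score
  else if owner != 0 && owner != ai then
    let score := score + count
    if E.contains (i, j) then score + 1
    else if K.contains (i, j) then score + 2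
    else score
  else score

theorem pv_body (s cnt o ai : Int) (eb kb : Bool) :
    (if (o == ai) then (if eb then s - cnt - 1 else if kb then s - cnt - 2 else s - cnt)
     else if (o != 0 && o != ai) then (if eb then s + cnt + 1 else if kb then s + cnt + 2 else s + cnt)
     else s)
    = s + (pvSign ai o * cnt + pvSign ai o * (if eb then 1 else if kb then 2 else 0)) := by
  unfold pvSign
  by_cases h1 : o = ai <;> by_cases h2 : o = 0 <;> simp [h1, h2] <;> split_ifs <;> ring

theorem pvABody_eq (board : List (List (Int × Int))) (ai : Int) (E K : List (Int × Int)) (i : Int) :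
    pvABody board ai E K i = fun s j => s + pvD board ai E K (i, j) := by
  funext s j
  exact pv_body s (pvCell board (i, j)).1 (pvCell board (i, j)).2 ai (E.contains (i, j)) (K.contains (i, j))

theorem pvA_inner (board : List (List (Int × Int))) (ai : Int) (E K : List (Int × Int))
    (i c s : Int) :
    (PySem.List.pyRange 0 c).foldl (pvABody board ai E K i) s
      = s + ((PySem.List.pyRange 0 c).map (fun j => pvD board ai E K (i, j))).sum := by
  rw [pvABody_eq, PySem.List.foldl_add]

theorem pv_sum_map_flatMap {α β : Type} (l : List α) (f : α → List β) (h : β → Int) :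
    ((l.flatMap f).map h).sum = (l.map (fun a => ((f a).map h).sum)).sum := by
  induction l with
  | nil => simp
  | cons a t ih => simp [ih]

theorem pvE0_eq (r c : Int) : pvE0 r c = pvE r c := by
  unfold pvE0 pvE
  rw [PySem.List.foldl_append_eq_flatMap, PySem.List.foldl_append_eq_flatMap]
  simp

-- A as a sum of per-cell contributions over the grid
theorem heuristic_9_eq (board : List (List (Int × Int))) (ai : Int) :
    heuristic_9 board ai
      = ((pvG (board.length : Int) ((PySem.List.pyGetD board 0 []).length : Int)).map
          (pvD board ai (pvE (board.length : Int) ((PySem.List.pyGetD board 0 []).length : Int))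
            (pvK (board.length : Int) ((PySem.List.pyGetD board 0 []).length : Int)))).sum := by
  show (PySem.List.pyRange 0 (board.length : Int)).foldl
      (fun score i => (PySem.List.pyRange 0 ((PySem.List.pyGetD board 0 []).length : Int)).foldl
        (pvABody board ai
          (pvE0 (board.length : Int) ((PySem.List.pyGetD board 0 []).length : Int))
          (pvK (board.length : Int) ((PySem.List.pyGetD board 0 []).length : Int)) i) score) 0 = _
  rw [pvE0_eq]
  have h1 : (fun (score : Int) (i : Int) =>
      (PySem.List.pyRange 0 ((PySem.List.pyGetD board 0 []).length : Int)).foldl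
        (pvABody board ai
          (pvE (board.length : Int) ((PySem.List.pyGetD board 0 []).length : Int))
          (pvK (board.length : Int) ((PySem.List.pyGetD board 0 []).length : Int)) i) score)
      = fun score i => score +
          ((PySem.List.pyRange 0 ((PySem.List.pyGetD board 0 []).length : Int)).map
            (fun j => pvD board ai
              (pvE (board.length : Int) ((PySem.List.pyGetD board 0 []).length : Int))
              (pvK (board.length : Int) ((PySem.List.pyGetD board 0 []).length : Int)) (i, j))).sum := by
    funext score i; exact pvA_inner ..
  rw [h1, PySem.List.foldl_add]
  rw [show pvG (board.length : Int) ((PySem.List.pyGetD board 0 []).length : Int)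
      = (PySem.List.pyRange 0 (board.length : Int)).flatMap
          (fun i => (PySem.List.pyRange 0 ((PySem.List.pyGetD board 0 []).length : Int)).map
            (fun j => (i, j))) from rfl]
  rw [pv_sum_map_flatMap]
  simp [List.map_map, Function.comp_def]

-- ofList through B's double-add fold
theorem pv_set_foldl_add2 {α β : Type} [BEq α] (l : List β) (f g : β → α) (s : List α) :
    l.foldl (fun acc x => PySem.Set.add (PySem.Set.add acc (f x)) (g x)) (PySem.Set.ofList s)
      = PySem.Set.ofList (l.foldl (fun acc x => acc ++ [f x, g x]) s) := by
  induction l generalizing s with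
  | nil => rfl
  | cons a t ih =>
    have h : PySem.Set.ofList (s ++ [f a, g a])
        = PySem.Set.add (PySem.Set.add (PySem.Set.ofList s) (f a)) (g a) := by
      rw [PySem.Set.ofList_eq_foldl, PySem.Set.ofList_eq_foldl, List.foldl_append]
      rfl
    simpa [h] using ih (s ++ [f a, g a])

-- B as base sum + corner sum + edge sum
theorem heuristic_9_alt_eq (board : List (List (Int × Int))) (ai : Int) :
    heuristic_9_alt board ai
      = (board.map (fun row =>
            ((row.take (PySem.List.pyGetD board 0 []).length).map (fun c => pvSign ai c.2 * c.1)).sum)).sum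
        + ((PySem.Set.ofList (pvK (board.length : Int) ((PySem.List.pyGetD board 0 []).length : Int))).map
            (fun p => 2 * pvSg board ai p)).sum
        + ((PySem.Set.ofList (pvE (board.length : Int) ((PySem.List.pyGetD board 0 []).length : Int))).map
            (pvSg board ai)).sum := by
  show ((PySem.List.pyRange 1 ((board.length : Int) - 1)).foldl
      (fun s i => PySem.Set.add (PySem.Set.add s (i, 0)) (i, ((PySem.List.pyGetD board 0 []).length : Int) - 1))
      ((PySem.List.pyRange 1 (((PySem.List.pyGetD board 0 []).length : Int) - 1)).foldl
        (fun s j => PySem.Set.add (PySem.Set.add s (0, j)) ((board.length : Int) - 1, j))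
        (PySem.Set.ofList []))).foldl
      (fun s p => s + pvSg board ai p)
      (((pvK (board.length : Int) ((PySem.List.pyGetD board 0 []).length : Int)).foldl
          (fun s p => PySem.Set.add s p) (PySem.Set.ofList [])).foldl
        (fun s p => s + 2 * pvSg board ai p)
        (board.foldl (fun s row =>
          (PySem.List.slice row none (some ((PySem.List.pyGetD board 0 []).length : Int))).foldl
            (fun s c => s + pvSign ai c.2 * c.1) s) 0)) = _
  rw [pv_set_foldl_add2, pv_set_foldl_add2]
  have hK : (pvK (board.length : Int) ((PySem.List.pyGetD board 0 []).length : Int)).foldl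
      (fun s p => PySem.Set.add s p) (PySem.Set.ofList [])
      = PySem.Set.ofList (pvK (board.length : Int) ((PySem.List.pyGetD board 0 []).length : Int)) :=
    (PySem.Set.ofList_eq_foldl _).symm
  rw [hK]
  have hbase : (fun (s : Int) (row : List (Int × Int)) =>
      (PySem.List.slice row none (some ((PySem.List.pyGetD board 0 []).length : Int))).foldl
        (fun s c => s + pvSign ai c.2 * c.1) s)
      = fun s row => s + ((row.take (PySem.List.pyGetD board 0 []).length).map
          (fun c => pvSign ai c.2 * c.1)).sum := by
    funext s row
    rw [PySem.List.slice_to_natCast, PySem.List.foldl_add]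
  rw [hbase, PySem.List.foldl_add, PySem.List.foldl_add, PySem.List.foldl_add]
  rw [show ((PySem.List.pyRange 1 ((board.length : Int) - 1)).foldl
      (fun acc i => acc ++ [(i, 0), (i, ((PySem.List.pyGetD board 0 []).length : Int) - 1)])
      ((PySem.List.pyRange 1 (((PySem.List.pyGetD board 0 []).length : Int) - 1)).foldl
        (fun acc j => acc ++ [(0, j), ((board.length : Int) - 1, j)]) []))
      = pvE (board.length : Int) ((PySem.List.pyGetD board 0 []).length : Int) from
    pvE0_eq (board.length : Int) ((PySem.List.pyGetD board 0 []).length : Int)]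
  ring

theorem pv_map_range_getD {α β : Type} (row : List α) (d : α) (g : α → β) (cn : Nat)
    (h : cn ≤ row.length) :
    (List.range cn).map (fun j => g (row.getD j d)) = (row.take cn).map g := by
  apply List.ext_getElem
  · simp [h]
  · intro i h1 h2
    simp at h1 ⊢
    rw [List.getElem?_eq_getElem (lt_of_lt_of_le h1 h)]
    simp

theorem pv_nodup_pyRange (n : Int) : (PySem.List.pyRange 0 n).Nodup := by
  rcases (show 0 ≤ n ∨ n < 0 by omega) with h | h
  · obtain ⟨m, rfl⟩ := Int.eq_ofNat_of_zero_le h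
    rw [PySem.List.pyRange_zero_natCast]
    exact (List.nodup_range).map (fun a b hab => by omega)
  · have : PySem.List.pyRange 0 n = [] := by
      apply List.eq_nil_iff_forall_not_mem.mpr
      intro x hx
      rw [PySem.List.mem_pyRange_one] at hx
      omega
    simp [this]

theorem pv_mem_G (r c : Int) (p : Int × Int) :
    p ∈ pvG r c ↔ (0 ≤ p.1 ∧ p.1 < r) ∧ (0 ≤ p.2 ∧ p.2 < c) := by
  obtain ⟨a, b⟩ := p
  rw [pvG, List.mem_product, PySem.List.mem_pyRange_one, PySem.List.mem_pyRange_one]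

theorem pv_mem_E (r c : Int) (p : Int × Int) :
    p ∈ pvE r c ↔ ((p.1 = 0 ∨ p.1 = r - 1) ∧ 1 ≤ p.2 ∧ p.2 < c - 1) ∨
      ((p.2 = 0 ∨ p.2 = c - 1) ∧ 1 ≤ p.1 ∧ p.1 < r - 1) := by
  obtain ⟨a, b⟩ := p
  simp [pvE, List.mem_flatMap, PySem.List.mem_pyRange_one, Prod.ext_iff]
  constructor
  · rintro (⟨j, hj, h⟩ | ⟨i, hi, h⟩) <;> rcases h with ⟨h1, h2⟩ | ⟨h1, h2⟩ <;>
      subst h1 <;> subst h2 <;> tauto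
  · rintro (⟨h1, h2, h3⟩ | ⟨h1, h2, h3⟩)
    · exact Or.inl ⟨b, ⟨h2, h3⟩, by tauto⟩
    · exact Or.inr ⟨a, ⟨h2, h3⟩, by tauto⟩

theorem pv_K_disj_E (r c : Int) (p : Int × Int) (hk : p ∈ pvK r c) : p ∉ pvE r c := by
  intro he
  obtain ⟨a, b⟩ := p
  rw [pv_mem_E] at he
  simp [pvK, Prod.ext_iff] at hk
  simp at he
  omega

theorem pv_sum_ite_mem (G L : List (Int × Int)) (f : Int × Int → Int) (hG : G.Nodup)
    (hsub : ∀ x ∈ L, x ∈ G) :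
    (G.map (fun p => if p ∈ L then f p else 0)).sum = ((PySem.Set.ofList L).map f).sum := by
  rw [← List.sum_toFinset _ hG, ← List.sum_toFinset _ (PySem.Set.nodup_ofList L),
    ← Finset.sum_filter]
  apply Finset.sum_congr _ (fun _ _ => rfl)
  ext x
  simp [PySem.Set.mem_ofList]
  exact fun h => hsub x h

-- the bonus part of A's sum equals B's two boundary sums
theorem pv_bonus_eq (board : List (List (Int × Int))) (ai : Int) (rn cn : Nat)
    (hr : 1 ≤ rn) (hc : 1 ≤ cn) :
    ((pvG (rn : Int) (cn : Int)).map (fun p =>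
        pvSg board ai p * (if (pvE (rn : Int) (cn : Int)).contains p then 1
          else if (pvK (rn : Int) (cn : Int)).contains p then 2 else 0))).sum
      = ((PySem.Set.ofList (pvK (rn : Int) (cn : Int))).map (fun p => 2 * pvSg board ai p)).sum
        + ((PySem.Set.ofList (pvE (rn : Int) (cn : Int))).map (pvSg board ai)).sum := by
  have hpt : ∀ p, pvSg board ai p * (if (pvE (rn : Int) (cn : Int)).contains p then 1
      else if (pvK (rn : Int) (cn : Int)).contains p then 2 else 0)
      = (if p ∈ pvE (rn : Int) (cn : Int) then pvSg board ai p else 0)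
        + (if p ∈ pvK (rn : Int) (cn : Int) then 2 * pvSg board ai p else 0) := by
    intro p
    by_cases he : p ∈ pvE (rn : Int) (cn : Int) <;>
      by_cases hk : p ∈ pvK (rn : Int) (cn : Int)
    · exact absurd he (pv_K_disj_E _ _ _ hk)
    all_goals simp [he, hk] <;> ring
  have hGnd : (pvG (rn : Int) (cn : Int)).Nodup :=
    List.Nodup.product (pv_nodup_pyRange _) (pv_nodup_pyRange _)
  have hEsub : ∀ x ∈ pvE (rn : Int) (cn : Int), x ∈ pvG (rn : Int) (cn : Int) := by
    intro x hx
    rw [pv_mem_E] at hx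
    rw [pv_mem_G]
    omega
  have hKsub : ∀ x ∈ pvK (rn : Int) (cn : Int), x ∈ pvG (rn : Int) (cn : Int) := by
    intro x hx
    obtain ⟨a, b⟩ := x
    simp [pvK, Prod.ext_iff] at hx
    rw [pv_mem_G]
    simp
    omega
  calc ((pvG (rn : Int) (cn : Int)).map (fun p =>
        pvSg board ai p * (if (pvE (rn : Int) (cn : Int)).contains p then 1
          else if (pvK (rn : Int) (cn : Int)).contains p then 2 else 0))).sum
      = ((pvG (rn : Int) (cn : Int)).map (fun p =>
          (if p ∈ pvE (rn : Int) (cn : Int) then pvSg board ai p else 0)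
            + (if p ∈ pvK (rn : Int) (cn : Int) then 2 * pvSg board ai p else 0))).sum := by
        rw [List.map_congr_left (fun p _ => hpt p)]
    _ = ((PySem.Set.ofList (pvE (rn : Int) (cn : Int))).map (pvSg board ai)).sum
          + ((PySem.Set.ofList (pvK (rn : Int) (cn : Int))).map (fun p => 2 * pvSg board ai p)).sum := by
        rw [PySem.List.sum_map_add_int, pv_sum_ite_mem _ _ _ hGnd hEsub,
          pv_sum_ite_mem _ _ _ hGnd hKsub]
    _ = _ := by ring

-- the base part of A's sum equals B's first pass
theorem pv_base_eq (board : List (List (Int × Int))) (ai : Int) (cn : Nat)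
    (hrow : ∀ row ∈ board, cn ≤ row.length) :
    ((pvG (board.length : Int) (cn : Int)).map (fun p =>
        pvSg board ai p * (pvCell board p).1)).sum
      = (board.map (fun row => ((row.take cn).map (fun c => pvSign ai c.2 * c.1)).sum)).sum := by
  rw [show pvG (board.length : Int) (cn : Int)
      = (PySem.List.pyRange 0 (board.length : Int)).flatMap
          (fun i => (PySem.List.pyRange 0 (cn : Int)).map (fun j => (i, j))) from rfl]
  rw [pv_sum_map_flatMap, PySem.List.pyRange_zero_natCast, PySem.List.pyRange_zero_natCast,
    List.map_map]
  congr 1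
  apply List.ext_getElem
  · simp
  · intro i h1 h2
    have hlen : i < board.length := by simpa using h1
    simp only [List.getElem_map, List.getElem_range, Function.comp_apply, List.map_map]
    have hrw : ((fun p => pvSg board ai p * (pvCell board p).1) ∘
          ((fun j => (((i : Nat) : Int), j)) ∘ (fun k : Nat => ((k : Int)))))
        = fun k : Nat => pvSign ai ((board[i]).getD k (0, 0)).2 * ((board[i]).getD k (0, 0)).1 := by
      funext k
      simp [pvSg, pvCell, PySem.List.pyGetD_natCast, List.getD_eq_getElem?_getD,
        List.getElem?_eq_getElem hlen]
    rw [hrw, pv_map_range_getD (board[i]) (0, 0) (fun c => pvSign ai c.2 * c.1) cn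
      (hrow _ (List.getElem_mem _))]

-- ===== VERDICT (by name: the statement is the Claim_ definition above) =====
theorem heuristic_9_spec : Claim_equal_heuristic_9 := by
  intro board ai _hdom hpre
  obtain ⟨hne, hc1, hrow⟩ := hpre
  have hcn : (PySem.List.pyGetD board 0 []).length = (board.headD []).length := by
    cases board with
    | nil => exact absurd rfl hne
    | cons a t => simp [PySem.List.pyGetD_zero]
  have hr1 : 1 ≤ board.length := by
    cases board with
    | nil => exact absurd rfl hne
    | cons a t => simp
  unfold Spec_heuristic_9
  rw [heuristic_9_eq, heuristic_9_alt_eq]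
  unfold pvD
  rw [PySem.List.sum_map_add_int]
  rw [hcn, pv_base_eq board ai _ hrow, pv_bonus_eq board ai _ _ hr1 hc1]
  ring
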